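-- pv_equiv track=rewrite | github.com/Remyb98/5I-IN1 | repartition_stock.py | calculerMA
-- ===== SOURCE A (Python) =====
-- def calculerMA(G):  # G[0:n+1]][0:S+1] est de terme général G[i][s] = g(i,s) = gain obtenu
--     # par la livraison d'un stock s à l'entrepôt de numéro i.
--     n = len(G)
--     S = len(G[0]) - 1
--     M = [[-1 for s in range(S + 1)] for k in range(n + 1)]  # -1, ou une valeur quelconque.
--     A = [[0 for s in range(S + 1)] for k in range(n + 1)]  # 0 ou une valeur quelconque.
--     # base de la récurrence : m
--     for s in range(S + 1): M[0][s] = 0  # m(0,s) = 0 qqsoit s, 0 ? s < S+1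
--     # cas général : par taille k croissante, calculer et mémoriser toutes les valeurs m(k,s)
--     # qqsoit k, qqsoit s, 1 ? k < n+1, 0 ? s < S+1
--     # m(k,s) =  max_{0 ?  s' < s+1} ( g(k-1,s') + m(k-1,s-s') )
--     for k in range(1, n + 1):  # par tailles k croissantes
--         for s in range(0, S + 1):  # pour tout stock s
--             # calculer m(k,s) = max_{0 ?  s' < s+1} ( g(k-1,s') + m(k-1,s-s') )
--             for sprime in range(0, s + 1):
--                 mks = G[k - 1][sprime] + M[k - 1][s - sprime]
--                 if mks > M[k][s]:
--                     M[k][s] = mks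
--                     A[k][s] = sprime
--     #return M, A*
--     return M[n][s]
-- ===== SOURCE B (Python) =====
-- def calculerMA(G):
--     S = len(G[0]) - 1
--     memo = {}
--
--     def m(k, s):
--         if k == 0:
--             return 0
--         if (k, s) not in memo:
--             best = -1
--             for sp in range(s + 1):
--                 v = G[k - 1][sp] + m(k - 1, s - sp)
--                 if v > best:
--                     best = v
--             memo[(k, s)] = best
--         return memo[(k, s)]
--
--     return m(len(G), S)
-- ===== Notes on version B (the rewrite author's own statement) =====
-- stated objective: alternative
-- what changed: Replaces A's bottom-up triple-loop DP over two mutable (n+1)x(S+1) tables by a top-down recursive formulation of the recurrence with a memo dict keyed by (k,s), computing only the subproblems actually reachable from (n,S).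
import Mathlib
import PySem

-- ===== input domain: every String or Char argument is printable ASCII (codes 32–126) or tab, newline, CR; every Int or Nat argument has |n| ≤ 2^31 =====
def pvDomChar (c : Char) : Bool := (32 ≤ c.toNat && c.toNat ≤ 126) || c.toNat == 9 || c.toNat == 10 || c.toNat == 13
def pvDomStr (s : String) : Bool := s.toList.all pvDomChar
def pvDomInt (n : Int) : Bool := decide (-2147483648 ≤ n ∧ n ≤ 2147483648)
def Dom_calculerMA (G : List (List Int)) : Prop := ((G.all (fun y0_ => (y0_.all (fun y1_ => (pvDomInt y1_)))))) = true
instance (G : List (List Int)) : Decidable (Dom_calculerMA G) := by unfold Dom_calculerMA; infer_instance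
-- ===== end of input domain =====

-- B replaces A's bottom-up triple-loop DP over two mutable (n+1)×(S+1) tables by a top-down
-- recursive formulation of the same recurrence with a memo dict keyed by (k,s); objective:
-- alternative (same asymptotic cost).

-- ===== PORT A =====
-- helper: M[k][s] = v (write into a list of rows)
def setCell (rows : List (List Int)) (k s : Nat) (v : Int) : List (List Int) :=
  rows.set k ((rows.getD k []).set s v)

-- the body of A's innermost loop (state = (M, A), as in the Python)
def stepSp (G : List (List Int)) (k0 s : Nat) (MA : List (List Int) × List (List Int))
    (sp : Nat) : List (List Int) × List (List Int) :=
  let mks := (G.getD k0 []).getD sp 0 + (MA.1.getD k0 []).getD (s - sp) 0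
  if mks > (MA.1.getD (k0 + 1) []).getD s 0 then
    (setCell MA.1 (k0 + 1) s mks, setCell MA.2 (k0 + 1) s (Int.ofNat sp))
  else MA

-- A's loop over s (for each s, the loop over sprime = 0..s); k = k0+1
def stepS (G : List (List Int)) (k0 : Nat) (MA : List (List Int) × List (List Int))
    (s : Nat) : List (List Int) × List (List Int) :=
  (List.range (s + 1)).foldl (stepSp G k0 s) MA

-- A's loop body for k = k0+1 (range(1, n+1) is walked as k0 ∈ range n)
def stepK (G : List (List Int)) (S1 : Nat) (MA : List (List Int) × List (List Int))
    (k0 : Nat) : List (List Int) × List (List Int) :=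
  (List.range S1).foldl (stepS G k0) MA

def calculerMA (G : List (List Int)) : Int :=
  let n := G.length
  let S1 := (G.headD []).length   -- S + 1
  let M0 : List (List Int) := List.replicate (n + 1) (List.replicate S1 (-1))
  let A0 : List (List Int) := List.replicate (n + 1) (List.replicate S1 0)
  let M1 := (List.range S1).foldl (fun M s => setCell M 0 s 0) M0   -- M[0][s] = 0
  let MAf := (List.range n).foldl (stepK G S1) (M1, A0)
  (MAf.1.getD n []).getD (S1 - 1) 0   -- return M[n][s], s = S after the loops

-- ===== PORT B =====
-- top-down memoized recursion, memo : dict keyed by (k, s).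
-- mB = def m(k, s); mBloop = its 'for sp in range(s+1)' loop threading the memo.
mutual
def mB (G : List (List Int)) (k s : Nat) (memo : PySem.Dict (Nat × Nat) Int) :
    Int × PySem.Dict (Nat × Nat) Int :=
  match k with
  | 0 => (0, memo)
  | Nat.succ k' =>
    match memo.get? (k' + 1, s) with
    | some v => (v, memo)
    | none =>
      let r := mBloop G k' s (List.range (s + 1)) (-1) memo
      (r.1, r.2.insert (k' + 1, s) r.1)
termination_by (k, 0)

def mBloop (G : List (List Int)) (k' s : Nat) (sps : List Nat) (best : Int)
    (memo : PySem.Dict (Nat × Nat) Int) : Int × PySem.Dict (Nat × Nat) Int :=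
  match sps with
  | [] => (best, memo)
  | sp :: rest =>
    let r := mB G k' (s - sp) memo
    let v := (G.getD k' []).getD sp 0 + r.1
    mBloop G k' s rest (if v > best then v else best) r.2
termination_by (k', sps.length + 1)
end

def calculerMA_alt (G : List (List Int)) : Int :=
  let S := (G.headD []).length - 1     -- len(G[0]) - 1 (Pre_ guarantees len(G[0]) ≥ 1)
  (mB G G.length S PySem.Dict.empty).1

-- ===== PRECONDITION & SPEC =====
-- Pre_ = exactly the inputs where Python A returns: G nonempty (else G[0] raises IndexError),
-- G[0] nonempty (else the loop variable s is unbound → NameError), and every row at least as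
-- long as G[0] (else G[k-1][sprime] raises IndexError).
def Pre_calculerMA (G : List (List Int)) : Prop :=
  G ≠ [] ∧ 1 ≤ (G.headD []).length ∧ ∀ r ∈ G, (G.headD []).length ≤ r.length
instance (G : List (List Int)) : Decidable (Pre_calculerMA G) := by
  unfold Pre_calculerMA; infer_instance

def pvWitness_calculerMA : List (List Int) := [[1, 2], [0, 3]]

def Spec_calculerMA (G : List (List Int)) (out : Int) : Prop := out = calculerMA_alt G
instance (G : List (List Int)) (out : Int) : Decidable (Spec_calculerMA G out) := by
  unfold Spec_calculerMA; infer_instance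

-- ===== CLAIM (what is proved, stated in full; the proofs are below) =====
def Claim_equal_calculerMA : Prop :=
  ∀ (G : List (List Int)), Dom_calculerMA G → Pre_calculerMA G → Spec_calculerMA G (calculerMA G)

-- ===== LEMMAS AND PROOFS =====

-- the value m(k,s) of the recurrence (pure specification shared by both proofs)
def mspec (G : List (List Int)) : Nat → Nat → Int
  | 0, _ => 0
  | k + 1, s =>
    ((List.range (s + 1)).map (fun sp => (G.getD k []).getD sp 0 + mspec G k (s - sp))).foldl
      max (-1)

-- one row of values of the recurrence, as B computes it (bRow g row S1)[s] = m(k,s)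
def bRow (g row : List Int) (S1 : Nat) : List Int :=
  (List.range S1).map (fun s =>
    ((List.range (s + 1)).map (fun sp => g.getD sp 0 + row.getD (s - sp) 0)).foldl max (-1))

-- the sequence of rows A's table acquires: rows 0 = all zeros, rows (k+1) from rows k
def rowsSpec (G : List (List Int)) (S1 : Nat) : Nat → List Int
  | 0 => List.replicate S1 0
  | k + 1 => bRow (G.getD k []) (rowsSpec G S1 k) S1

lemma rowsSpec_length (G : List (List Int)) (S1 k : Nat) : (rowsSpec G S1 k).length = S1 := by
  cases k <;> simp [rowsSpec, bRow]

-- A's M table after finishing rows 0..k0 and the first s0 cells of row k0+1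
def Mpart (G : List (List Int)) (S1 n k0 s0 : Nat) : List (List Int) :=
  (List.range (n + 1)).map (fun j =>
    if j ≤ k0 then rowsSpec G S1 j
    else if j = k0 + 1 then (rowsSpec G S1 (k0 + 1)).take s0 ++ List.replicate (S1 - s0) (-1)
    else List.replicate S1 (-1))

-- small getD facts
lemma getD_set_self {α : Type} (l : List α) (i : Nat) (v d : α) (h : i < l.length) :
    (l.set i v).getD i d = v := by
  simp [List.getD_eq_getElem?_getD, List.getElem?_set_self h]

lemma getD_map_range {α : Type} [Inhabited α] (f : Nat → α) (n j : Nat) (h : j < n) (d : α) :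
    ((List.range n).map f).getD j d = f j := by
  simp [List.getD_eq_getElem?_getD, List.getElem?_map, List.getElem?_range h]

-- setCell facts
lemma setCell_length (M : List (List Int)) (k s : Nat) (v : Int) :
    (setCell M k s v).length = M.length := by simp [setCell]

lemma getD_setCell_self (M : List (List Int)) (k s : Nat) (v : Int) (h : k < M.length) :
    (setCell M k s v).getD k [] = (M.getD k []).set s v := by
  unfold setCell
  rw [List.getD_eq_getElem?_getD, List.getElem?_set_self h, Option.getD_some]

lemma getD_setCell_ne (M : List (List Int)) (k k' s : Nat) (v : Int) (h : k ≠ k') :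
    (setCell M k s v).getD k' [] = M.getD k' [] := by
  unfold setCell
  rw [List.getD_eq_getElem?_getD, List.getElem?_set_ne h, ← List.getD_eq_getElem?_getD]

lemma setCell_setCell (M : List (List Int)) (k s : Nat) (v w : Int) (h : k < M.length) :
    setCell (setCell M k s v) k s w = setCell M k s w := by
  have h1 := getD_setCell_self M k s v h
  unfold setCell at h1 ⊢
  rw [h1, List.set_set, List.set_set]

lemma setCell_self (M : List (List Int)) (k s : Nat) (hk : k < M.length)
    (hs : s < (M.getD k []).length) :
    setCell M k s ((M.getD k []).getD s 0) = M := by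
  have h1 : (M.getD k []).getD s 0 = (M.getD k [])[s] := by
    rw [List.getD_eq_getElem?_getD, List.getElem?_eq_getElem hs, Option.getD_some]
  rw [setCell, h1, List.set_getElem_self hs]
  have h2 : M.getD k [] = M[k] := by
    rw [List.getD_eq_getElem?_getD, List.getElem?_eq_getElem hk, Option.getD_some]
  rw [h2, List.set_getElem_self hk]

-- the innermost (sprime) loop: it only updates cell (k0+1, s), as a running max
lemma inner_fold (G : List (List Int)) (k0 s : Nat) (l : List Nat) :
    ∀ (M A : List (List Int)), k0 + 1 < M.length → s < (M.getD (k0 + 1) []).length →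
    (l.foldl (stepSp G k0 s) (M, A)).1
      = setCell M (k0 + 1) s
          (l.foldl (fun m sp => max m ((G.getD k0 []).getD sp 0 + (M.getD k0 []).getD (s - sp) 0))
                   ((M.getD (k0 + 1) []).getD s 0)) := by
  induction l with
  | nil =>
    intro M A hk hs
    simpa using (setCell_self M (k0 + 1) s hk hs).symm
  | cons sp rest ih =>
    intro M A hk hs
    simp only [List.foldl_cons]
    by_cases hgt : (G.getD k0 []).getD sp 0 + (M.getD k0 []).getD (s - sp) 0
        > (M.getD (k0 + 1) []).getD s 0
    · set mks := (G.getD k0 []).getD sp 0 + (M.getD k0 []).getD (s - sp) 0 with hmks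
      set M' := setCell M (k0 + 1) s mks with hM'
      have hstep : stepSp G k0 s (M, A) sp = (M', setCell A (k0 + 1) s (Int.ofNat sp)) := by
        simp only [stepSp]
        rw [if_pos hgt]
      have hk' : k0 + 1 < M'.length := by
        rw [hM', setCell_length]; exact hk
      have hrow' : M'.getD (k0 + 1) [] = (M.getD (k0 + 1) []).set s mks :=
        getD_setCell_self M (k0 + 1) s mks hk
      have hs' : s < (M'.getD (k0 + 1) []).length := by
        rw [hrow', List.length_set]; exact hs
      have hprev : M'.getD k0 [] = M.getD k0 [] :=
        getD_setCell_ne M (k0 + 1) k0 s mks (by omega)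
      have hcell : (M'.getD (k0 + 1) []).getD s 0 = mks := by
        rw [hrow']; exact getD_set_self _ _ _ _ hs
      rw [hstep, ih M' _ hk' hs']
      simp only [hprev, hcell]
      rw [hM', setCell_setCell M (k0 + 1) s mks _ hk,
        max_eq_right (le_of_lt hgt)]
    · have hstep : stepSp G k0 s (M, A) sp = (M, A) := by
        simp only [stepSp]
        rw [if_neg hgt]
      rw [hstep, ih M A hk hs, max_eq_left (not_lt.mp hgt)]

-- writing the freshly computed cell extends the finished prefix of a row
lemma set_take_replicate (r : List Int) (m j : Nat) (hj : j < m) (hr : r.length = m) (v : Int)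
    (hv : v = r.getD j 0) :
    (r.take j ++ List.replicate (m - j) (-1)).set j v
      = r.take (j + 1) ++ List.replicate (m - (j + 1)) (-1) := by
  have hvv : v = r[j]'(by omega) := by
    rw [hv, List.getD_eq_getElem?_getD, List.getElem?_eq_getElem (by omega : j < r.length),
      Option.getD_some]
  apply List.ext_getElem
  · simp [List.length_set, List.length_take, hr]; omega
  · intro i h1 h2
    rw [List.getElem_set]
    split_ifs with hij
    · subst hij
      rw [List.getElem_append]
      have hjl : j < (r.take (j + 1)).length := by
        simp [List.length_take]; omega
      rw [dif_pos hjl, List.getElem_take]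
      exact hvv
    · have l1 : (List.take j r).length = j := by rw [List.length_take, hr]; omega
      have l2 : (List.take (j + 1) r).length = j + 1 := by rw [List.length_take, hr]; omega
      rw [List.getElem_append, List.getElem_append]
      split_ifs with h3 h4 h4
      · rw [List.getElem_take, List.getElem_take]
      · rw [l1] at h3; rw [l2] at h4; omega
      · rw [l1] at h3; rw [l2] at h4; omega
      · rw [List.getElem_replicate, List.getElem_replicate]

lemma mpart_length (G : List (List Int)) (S1 n k0 s0 : Nat) :
    (Mpart G S1 n k0 s0).length = n + 1 := by simp [Mpart]

-- rewriting a cell of a map-over-range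
lemma set_map_range {α : Type} (f : Nat → α) (n i : Nat) (v : α) :
    ((List.range n).map f).set i v
      = (List.range n).map (fun j => if j = i then v else f j) := by
  apply List.ext_getElem
  · simp
  · intro t h1 h2
    rw [List.getElem_set]
    simp only [List.getElem_map, List.getElem_range]
    rcases eq_or_ne i t with h | h
    · subst h; simp
    · simp [h.symm, h]

-- one step of A's s-loop fills one more cell of row k0+1 with the recurrence value
lemma stepS_fills (G : List (List Int)) (S1 n k0 s0 : Nat) (A : List (List Int))
    (hk : k0 < n) (hs : s0 < S1) :
    (stepS G k0 (Mpart G S1 n k0 s0, A) s0).1 = Mpart G S1 n k0 (s0 + 1) := by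
  have hkn : k0 + 1 < n + 1 := by omega
  have hrowk1 : (Mpart G S1 n k0 s0).getD (k0 + 1) []
      = (rowsSpec G S1 (k0 + 1)).take s0 ++ List.replicate (S1 - s0) (-1) := by
    rw [Mpart, getD_map_range _ _ _ hkn]
    simp
  have hrowk0 : (Mpart G S1 n k0 s0).getD k0 [] = rowsSpec G S1 k0 := by
    rw [Mpart, getD_map_range _ _ _ (by omega : k0 < n + 1)]
    simp
  have hlen1 : ((rowsSpec G S1 (k0 + 1)).take s0 ++ List.replicate (S1 - s0) (-1)).length
      = S1 := by
    simp [List.length_take, rowsSpec_length]; omega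
  have hcell0 : ((Mpart G S1 n k0 s0).getD (k0 + 1) []).getD s0 0 = -1 := by
    have hl : ((rowsSpec G S1 (k0 + 1)).take s0).length = s0 := by
      rw [List.length_take, rowsSpec_length]; omega
    rw [hrowk1, List.getD_eq_getElem?_getD,
      List.getElem?_append_right (le_of_eq hl), hl, Nat.sub_self, List.getElem?_replicate]
    simp [show 0 < S1 - s0 from by omega]
  have hfold := inner_fold G k0 s0 (List.range (s0 + 1)) (Mpart G S1 n k0 s0) A
    (by rw [mpart_length]; omega) (by rw [hrowk1, hlen1]; exact hs)
  rw [stepS, hfold, hcell0, hrowk0]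
  have hval : (List.range (s0 + 1)).foldl
      (fun m sp => max m ((G.getD k0 []).getD sp 0 + (rowsSpec G S1 k0).getD (s0 - sp) 0)) (-1)
      = (rowsSpec G S1 (k0 + 1)).getD s0 0 := by
    have : rowsSpec G S1 (k0 + 1) = bRow (G.getD k0 []) (rowsSpec G S1 k0) S1 := rfl
    rw [this, bRow, getD_map_range _ _ _ hs, List.foldl_map]
  rw [hval, setCell, hrowk1,
    set_take_replicate (rowsSpec G S1 (k0 + 1)) S1 s0 hs (rowsSpec_length G S1 (k0 + 1)) _ rfl,
    Mpart, set_map_range]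
  apply List.map_congr_left
  intro j hj
  rcases eq_or_ne j (k0 + 1) with h | h
  · subst h; simp [show ¬ k0 + 1 ≤ k0 from by omega]
  · simp [h]

-- the whole s-loop fills row k0+1
lemma sLoop_fills (G : List (List Int)) (S1 n k0 : Nat) (hk : k0 < n) :
    ∀ (j : Nat), j ≤ S1 → ∀ (A : List (List Int)), ∃ A',
      (List.range j).foldl (stepS G k0) (Mpart G S1 n k0 0, A) = (Mpart G S1 n k0 j, A') := by
  intro j
  induction j with
  | zero => intro _ A; exact ⟨A, rfl⟩
  | succ j ih =>
    intro hj A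
    obtain ⟨A', hA'⟩ := ih (by omega) A
    refine ⟨(stepS G k0 (Mpart G S1 n k0 j, A') j).2, ?_⟩
    rw [List.range_succ, List.foldl_append, hA', List.foldl_cons, List.foldl_nil]
    exact Prod.ext (stepS_fills G S1 n k0 j A' hk (by omega)) rfl

-- a finished row-k0+1 state is the starting state for k0+1
lemma mpart_succ (G : List (List Int)) (S1 n k0 : Nat) :
    Mpart G S1 n k0 S1 = Mpart G S1 n (k0 + 1) 0 := by
  apply List.map_congr_left
  intro j hj
  by_cases h1 : j ≤ k0
  · simp [h1, show j ≤ k0 + 1 from by omega]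
  · by_cases h2 : j = k0 + 1
    · simp [h2, List.take_of_length_le (le_of_eq (rowsSpec_length G S1 (k0 + 1)))]
    · have h3 : ¬ j ≤ k0 + 1 := by omega
      simp only [h1, h2, h3, if_false]
      split <;> simp

-- the k-loop fills all rows
lemma kLoop_fills (G : List (List Int)) (S1 n : Nat) :
    ∀ (j : Nat), j ≤ n → ∀ (A : List (List Int)), ∃ A',
      (List.range j).foldl (stepK G S1) (Mpart G S1 n 0 0, A) = (Mpart G S1 n j 0, A') := by
  intro j
  induction j with
  | zero => intro _ A; exact ⟨A, rfl⟩
  | succ j ih =>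
    intro hj A
    obtain ⟨A', hA'⟩ := ih (by omega) A
    obtain ⟨A'', hA''⟩ := sLoop_fills G S1 n j (by omega) S1 le_rfl A'
    refine ⟨A'', ?_⟩
    rw [List.range_succ, List.foldl_append, hA', List.foldl_cons, List.foldl_nil,
      stepK, hA'', mpart_succ]

-- A's initialisation state, with the first j cells of row 0 set to 0
def InitSt (G : List (List Int)) (S1 n j : Nat) : List (List Int) :=
  (List.range (n + 1)).map (fun i =>
    if i = 0 then (rowsSpec G S1 0).take j ++ List.replicate (S1 - j) (-1)
    else List.replicate S1 (-1))

lemma replicate_eq_map_range {α : Type} (m : Nat) (c : α) :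
    List.replicate m c = (List.range m).map (fun _ => c) := by
  apply List.ext_getElem
  · simp
  · intro i h1 h2
    simp

lemma initSt_zero (G : List (List Int)) (S1 n : Nat) :
    List.replicate (n + 1) (List.replicate S1 (-1 : Int)) = InitSt G S1 n 0 := by
  rw [InitSt, replicate_eq_map_range]
  apply List.map_congr_left
  intro j hj
  split <;> simp

lemma initSt_step (G : List (List Int)) (S1 n j : Nat) (hj : j < S1) :
    setCell (InitSt G S1 n j) 0 j 0 = InitSt G S1 n (j + 1) := by
  have hrow0 : (InitSt G S1 n j).getD 0 []
      = (rowsSpec G S1 0).take j ++ List.replicate (S1 - j) (-1) := by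
    rw [InitSt, getD_map_range _ _ _ (by omega : 0 < n + 1)]
    simp
  have hv : (0 : Int) = (rowsSpec G S1 0).getD j 0 := by
    rw [rowsSpec, List.getD_eq_getElem?_getD, List.getElem?_replicate]
    simp [hj]
  rw [setCell, hrow0,
    set_take_replicate (rowsSpec G S1 0) S1 j hj (rowsSpec_length G S1 0) _ hv,
    InitSt, set_map_range]
  apply List.map_congr_left
  intro i hi
  rcases eq_or_ne i 0 with h | h
  · subst h; simp
  · simp [h]

lemma initSt_done (G : List (List Int)) (S1 n : Nat) :
    InitSt G S1 n S1 = Mpart G S1 n 0 0 := by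
  apply List.map_congr_left
  intro j hj
  rcases eq_or_ne j 0 with h | h
  · subst h
    simp [List.take_of_length_le (le_of_eq (rowsSpec_length G S1 0))]
  · have h1 : ¬ j ≤ 0 := by omega
    simp only [h, h1, if_false]
    split <;> simp

-- the init loop produces Mpart 0 0
lemma init_fills (G : List (List Int)) (S1 n : Nat) :
    (List.range S1).foldl (fun M s => setCell M 0 s 0)
        (List.replicate (n + 1) (List.replicate S1 (-1)))
      = Mpart G S1 n 0 0 := by
  rw [initSt_zero G S1 n, ← initSt_done G S1 n]
  have main : ∀ (j : Nat), j ≤ S1 →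
      (List.range j).foldl (fun M s => setCell M 0 s 0) (InitSt G S1 n 0)
        = InitSt G S1 n j := by
    intro j
    induction j with
    | zero => intro _; rfl
    | succ j ih =>
      intro hj
      rw [List.range_succ, List.foldl_append, ih (by omega), List.foldl_cons, List.foldl_nil,
        initSt_step G S1 n j (by omega)]
  exact main S1 le_rfl

-- ===== B-side lemmas: the memoized recursion computes mspec =====

-- a memo is correct when every stored value is the recurrence value of its key
def MemoOK (G : List (List Int)) (memo : PySem.Dict (Nat × Nat) Int) : Prop :=
  ∀ (k s : Nat) (v : Int), memo.get? (k, s) = some v → v = mspec G k s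

lemma memoOK_empty (G : List (List Int)) : MemoOK G PySem.Dict.empty := by
  intro k s v h
  simp [PySem.Dict.get?_empty] at h

lemma if_gt_eq_max (a b : Int) : (if b > a then b else a) = max a b := by
  split_ifs with h
  · exact (max_eq_right h.le).symm
  · exact (max_eq_left (not_lt.mp h)).symm

-- the loop of B, assuming level-k calls are correct, is a running max that preserves MemoOK
lemma mBloop_correct (G : List (List Int)) (k' : Nat)
    (hmB : ∀ (s : Nat) (memo : PySem.Dict (Nat × Nat) Int), MemoOK G memo →
      (mB G k' s memo).1 = mspec G k' s ∧ MemoOK G (mB G k' s memo).2) :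
    ∀ (sps : List Nat) (s : Nat) (best : Int) (memo : PySem.Dict (Nat × Nat) Int),
      MemoOK G memo →
      (mBloop G k' s sps best memo).1
        = sps.foldl (fun b sp => max b ((G.getD k' []).getD sp 0 + mspec G k' (s - sp))) best
      ∧ MemoOK G (mBloop G k' s sps best memo).2 := by
  intro sps
  induction sps with
  | nil =>
    intro s best memo hok
    rw [show mBloop G k' s [] best memo = (best, memo) from by rw [mBloop]]
    exact ⟨rfl, hok⟩
  | cons sp rest ih =>
    intro s best memo hok
    obtain ⟨hv, hok'⟩ := hmB (s - sp) memo hok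
    have hstep : mBloop G k' s (sp :: rest) best memo
        = mBloop G k' s rest
            (if (G.getD k' []).getD sp 0 + (mB G k' (s - sp) memo).1 > best then
              (G.getD k' []).getD sp 0 + (mB G k' (s - sp) memo).1 else best)
            (mB G k' (s - sp) memo).2 := by
      conv_lhs => rw [mBloop]
    rw [hstep, hv, if_gt_eq_max]
    obtain ⟨h1, h2⟩ := ih s (max best ((G.getD k' []).getD sp 0 + mspec G k' (s - sp)))
      (mB G k' (s - sp) memo).2 hok'
    exact ⟨by rw [h1, List.foldl_cons], h2⟩

-- the memoized recursion returns the recurrence value and keeps the memo correct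
lemma mB_correct (G : List (List Int)) :
    ∀ (k s : Nat) (memo : PySem.Dict (Nat × Nat) Int), MemoOK G memo →
      (mB G k s memo).1 = mspec G k s ∧ MemoOK G (mB G k s memo).2 := by
  intro k
  induction k with
  | zero =>
    intro s memo hok
    rw [show mB G 0 s memo = (0, memo) from by rw [mB]]
    exact ⟨rfl, hok⟩
  | succ k' ih =>
    intro s memo hok
    rcases hval : memo.get? (k' + 1, s) with _ | v
    · -- not memoized: run the loop, store, return
      have hloop := mBloop_correct G k' ih (List.range (s + 1)) s (-1) memo hok
      have hbest : (mBloop G k' s (List.range (s + 1)) (-1) memo).1 = mspec G (k' + 1) s := by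
        rw [hloop.1, mspec, List.foldl_map]
      have hunf : mB G (k' + 1) s memo
          = ((mBloop G k' s (List.range (s + 1)) (-1) memo).1,
             (mBloop G k' s (List.range (s + 1)) (-1) memo).2.insert (k' + 1, s)
               (mBloop G k' s (List.range (s + 1)) (-1) memo).1) := by
        conv_lhs => rw [mB]
        rw [hval]
      rw [hunf]
      refine ⟨hbest, ?_⟩
      intro a b w hw
      rcases eq_or_ne (a, b) ((k' + 1 : Nat), s) with he | he
      · rw [he, PySem.Dict.get?_insert_self] at hw
        obtain ⟨h1, h2⟩ := Prod.mk.injEq .. ▸ he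
        rw [h1, h2, ← Option.some_inj.mp hw, hbest]
      · rw [PySem.Dict.get?_insert_of_ne _ _ he] at hw
        exact hloop.2 a b w hw
    · -- memoized
      have hunf : mB G (k' + 1) s memo = (v, memo) := by
        conv_lhs => rw [mB]
        rw [hval]
      rw [hunf]
      exact ⟨hok (k' + 1) s v hval, hok⟩

-- bridge: the recurrence value is the table-row value (within the row width)
lemma mspec_eq_rowsSpec (G : List (List Int)) (S1 : Nat) :
    ∀ (k s : Nat), s < S1 → mspec G k s = (rowsSpec G S1 k).getD s 0 := by
  intro k
  induction k with
  | zero =>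
    intro s hs
    rw [mspec, rowsSpec, List.getD_eq_getElem?_getD, List.getElem?_replicate]
    simp [hs]
  | succ k ih =>
    intro s hs
    rw [rowsSpec, bRow, getD_map_range _ _ _ hs, mspec]
    congr 1
    apply List.map_congr_left
    intro sp hsp
    rw [ih (s - sp) (by omega)]

-- ===== VERDICT (by name: the statement is the Claim_ definition above) =====
theorem calculerMA_spec : Claim_equal_calculerMA := by
  intro G _hdom hpre
  obtain ⟨_, hS1, _⟩ := hpre
  unfold Spec_calculerMA calculerMA calculerMA_alt
  simp only []
  rw [init_fills G ((G.headD []).length) G.length]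
  obtain ⟨A', hA'⟩ := kLoop_fills G ((G.headD []).length) G.length G.length le_rfl
    (List.replicate (G.length + 1) (List.replicate ((G.headD []).length) 0))
  rw [hA']
  rw [show (Mpart G ((G.headD []).length) G.length G.length 0, A').1
      = Mpart G ((G.headD []).length) G.length G.length 0 from rfl]
  rw [Mpart, getD_map_range _ _ _ (by omega : G.length < G.length + 1)]
  rw [(mB_correct G G.length ((G.headD []).length - 1) PySem.Dict.empty (memoOK_empty G)).1]
  rw [mspec_eq_rowsSpec G ((G.headD []).length) G.length ((G.headD []).length - 1) (by omega)]
  simp
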